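-- pv_equiv track=rewrite | github.com/stevemarin/advent-of-code-2023 | python/aoc2023/day17.py | straight_line
-- ===== SOURCE A (Python) =====
-- from typing import Iterator
--
-- Grid = list[list[int]]
--
-- def straight_line(
--     grid: Grid,
--     row: int,
--     col: int,
--     delta_row: int,
--     delta_col: int,
--     min_straight: int,
--     max_straight: int,
-- ) -> Iterator[tuple[int, int, int]]:
--     weight: int = 0
--
--     for length in range(1, max_straight + 1):
--         row += delta_row
--         col += delta_col
--
--         if not (0 <= row < len(grid) and 0 <= col < len(grid[0])):
--             break
--
--         weight += grid[row][col]
--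
--         if length >= min_straight:
--             yield row, col, weight
-- ===== SOURCE B (Python) =====
-- def straight_line(grid, row, col, delta_row, delta_col, min_straight, max_straight):
--     # Phase 1: collect the visited positions along the ray (prefix up to first out-of-bounds).
--     path = []
--     r, c = row, col
--     for _ in range(max(0, max_straight)):
--         r += delta_row
--         c += delta_col
--         if 0 <= r < len(grid) and 0 <= c < len(grid[0]):
--             path.append((r, c))
--         else:
--             break
--     # Phase 2: prefix sums of the cell weights.
--     sums = []
--     total = 0
--     for (r, c) in path:
--         total += grid[r][c]
--         sums.append(total)
--     # Phase 3: the emitted entries are exactly a suffix (1-based length >= min_straight).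
--     start = max(min_straight, 1)
--     for (r, c), w in list(zip(path, sums))[start - 1:]:
--         yield (r, c, w)
-- ===== Notes on version B (the rewrite author's own statement) =====
-- stated objective: alternative
-- what changed: B separates A's fused walk-accumulate-and-yield loop into three phases: collect the visited path prefix, compute prefix sums of the cell weights, then emit the length >= min_straight entries as a slice of the zipped list instead of a per-iteration test.
import Mathlib
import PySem

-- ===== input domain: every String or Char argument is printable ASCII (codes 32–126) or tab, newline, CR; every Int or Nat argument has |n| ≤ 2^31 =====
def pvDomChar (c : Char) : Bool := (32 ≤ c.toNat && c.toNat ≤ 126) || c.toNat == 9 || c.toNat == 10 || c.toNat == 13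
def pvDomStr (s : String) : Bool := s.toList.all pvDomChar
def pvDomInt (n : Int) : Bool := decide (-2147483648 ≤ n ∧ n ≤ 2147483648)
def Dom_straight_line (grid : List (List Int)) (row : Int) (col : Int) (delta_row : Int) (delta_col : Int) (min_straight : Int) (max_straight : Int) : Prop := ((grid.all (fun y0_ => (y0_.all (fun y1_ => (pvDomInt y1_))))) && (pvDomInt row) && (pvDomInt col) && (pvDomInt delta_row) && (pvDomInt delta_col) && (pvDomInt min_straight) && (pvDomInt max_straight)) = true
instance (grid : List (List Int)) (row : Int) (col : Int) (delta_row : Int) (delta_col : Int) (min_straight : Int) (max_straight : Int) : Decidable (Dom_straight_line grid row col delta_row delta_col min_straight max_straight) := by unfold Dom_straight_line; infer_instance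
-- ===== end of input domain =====

-- B replaces A's fused walk-accumulate-and-yield loop by three phases (collect path, prefix sums,
-- emit the length ≥ min_straight suffix by slicing); objective: alternative decomposition, same cost.

-- ===== PORT A =====
-- A's single loop over range(1, max_straight+1), carrying (length, row, col, weight); break = [].
-- Indexing grid[row][col] uses .toNat/getD: the guard proves both indices nonneg and Pre_ below
-- guarantees col is within the visited row, where getD is exact (Python raises outside Pre_).
def pvLoopA (grid : List (List Int)) (dr : Int) (dc : Int) (minS : Int) :
    Nat → Int → Int → Int → Int → List (Int × Int × Int)
  | 0, _, _, _, _ => []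
  | fuel+1, length, row, col, weight =>
    let row' := row + dr
    let col' := col + dc
    if 0 ≤ row' ∧ row' < (grid.length : Int) ∧ 0 ≤ col' ∧ col' < ((grid.headD []).length : Int) then
      let weight' := weight + (grid.getD row'.toNat []).getD col'.toNat 0
      (if minS ≤ length then [(row', col', weight')] else []) ++
        pvLoopA grid dr dc minS fuel (length + 1) row' col' weight'
    else []

def straight_line (grid : List (List Int)) (row : Int) (col : Int) (delta_row : Int) (delta_col : Int) (min_straight : Int) (max_straight : Int) : List (Int × Int × Int) :=
  pvLoopA grid delta_row delta_col min_straight max_straight.toNat 1 row col 0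

-- ===== PORT B =====
-- Phase 1 of Source B: collect the visited positions (prefix of the ray up to the first out-of-bounds).
def pvPath (grid : List (List Int)) (dr : Int) (dc : Int) :
    Nat → Int → Int → List (Int × Int)
  | 0, _, _ => []
  | n+1, r, c =>
    let r' := r + dr
    let c' := c + dc
    if 0 ≤ r' ∧ r' < (grid.length : Int) ∧ 0 ≤ c' ∧ c' < ((grid.headD []).length : Int) then
      (r', c') :: pvPath grid dr dc n r' c'
    else []

-- Phase 2 of Source B: running prefix sums of the cell weights along the path.
def pvSums (grid : List (List Int)) : List (Int × Int) → Int → List Int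
  | [], _ => []
  | (r, c) :: rest, total =>
    let t := total + (grid.getD r.toNat []).getD c.toNat 0
    t :: pvSums grid rest t

-- Phase 3 of Source B: list(zip(path, sums))[start-1:] — start-1 ≥ 0, so the slice is List.drop.
def straight_line_alt (grid : List (List Int)) (row : Int) (col : Int) (delta_row : Int) (delta_col : Int) (min_straight : Int) (max_straight : Int) : List (Int × Int × Int) :=
  let path := pvPath grid delta_row delta_col (max 0 max_straight).toNat row col
  let sums := pvSums grid path 0
  let start := max min_straight 1
  ((path.zip sums).drop (start - 1).toNat).map (fun p => (p.1.1, p.1.2, p.2))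

-- ===== PRECONDITION & SPEC =====
-- Pre_ excludes exactly the inputs on which Python's A raises IndexError: a ragged grid where the
-- walk reaches a cell whose row is shorter than grid[0] (the bounds check measures columns against
-- grid[0] only).  A reached step k has the guard true at every j ≤ k, and since a ray with a nonzero
-- delta stays in the R×C bounding box for at most max(R, C) consecutive steps (and a zero-delta ray
-- revisits one cell, checked at step 1), quantifying k below min(max_straight, max(R, C)) is exact.
def Pre_straight_line (grid : List (List Int)) (row : Int) (col : Int) (delta_row : Int) (delta_col : Int) (min_straight : Int) (max_straight : Int) : Prop :=
  ∀ k ∈ List.range (min max_straight.toNat (max grid.length (grid.headD []).length)),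
    (∀ j ∈ List.range (k + 1),
      0 ≤ row + ((j : Int) + 1) * delta_row ∧ row + ((j : Int) + 1) * delta_row < (grid.length : Int) ∧
      0 ≤ col + ((j : Int) + 1) * delta_col ∧ col + ((j : Int) + 1) * delta_col < ((grid.headD []).length : Int)) →
    col + ((k : Int) + 1) * delta_col < ((grid.getD (row + ((k : Int) + 1) * delta_row).toNat []).length : Int)
instance (grid : List (List Int)) (row : Int) (col : Int) (delta_row : Int) (delta_col : Int) (min_straight : Int) (max_straight : Int) : Decidable (Pre_straight_line grid row col delta_row delta_col min_straight max_straight) := by unfold Pre_straight_line; infer_instance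

def pvWitness_straight_line : List (List Int) × Int × Int × Int × Int × Int × Int :=
  ([[1, 2], [3, 4]], 0, 0, 0, 1, 1, 2)

def Spec_straight_line (grid : List (List Int)) (row : Int) (col : Int) (delta_row : Int) (delta_col : Int) (min_straight : Int) (max_straight : Int) (out : List (Int × Int × Int)) : Prop := out = straight_line_alt grid row col delta_row delta_col min_straight max_straight
instance (grid : List (List Int)) (row : Int) (col : Int) (delta_row : Int) (delta_col : Int) (min_straight : Int) (max_straight : Int) (out : List (Int × Int × Int)) : Decidable (Spec_straight_line grid row col delta_row delta_col min_straight max_straight out) := by unfold Spec_straight_line; infer_instance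

-- ===== CLAIM (what is proved, stated in full; the proofs are below) =====
def Claim_equal_straight_line : Prop := ∀ (grid : List (List Int)) (row : Int) (col : Int) (delta_row : Int) (delta_col : Int) (min_straight : Int) (max_straight : Int), Dom_straight_line grid row col delta_row delta_col min_straight max_straight → Pre_straight_line grid row col delta_row delta_col min_straight max_straight → Spec_straight_line grid row col delta_row delta_col min_straight max_straight (straight_line grid row col delta_row delta_col min_straight max_straight)

-- ===== LEMMAS AND PROOFS =====

-- A's loop rephrased: yield element i iff minS ≤ L + i, over the zipped (position, prefix sum) list.
def pvEmit (minS : Int) : Int → List ((Int × Int) × Int) → List (Int × Int × Int)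
  | _, [] => []
  | L, (p, s) :: t => (if minS ≤ L then [(p.1, p.2, s)] else []) ++ pvEmit minS (L + 1) t

theorem pvLoopA_eq_emit (grid : List (List Int)) (dr dc minS : Int) :
    ∀ (fuel : Nat) (L r c w : Int),
      pvLoopA grid dr dc minS fuel L r c w =
        pvEmit minS L ((pvPath grid dr dc fuel r c).zip
          (pvSums grid (pvPath grid dr dc fuel r c) w)) := by
  intro fuel
  induction fuel with
  | zero => intro L r c w; simp [pvLoopA, pvPath, pvSums, pvEmit]
  | succ n ih =>
    intro L r c w
    simp only [pvLoopA, pvPath]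
    split
    · simp only [pvSums, List.zip_cons_cons, pvEmit, ih]
    · simp [pvSums, pvEmit]

theorem pvEmit_eq_drop (minS : Int) :
    ∀ (zs : List ((Int × Int) × Int)) (L : Int),
      pvEmit minS L zs = (zs.drop (minS - L).toNat).map (fun p => (p.1.1, p.1.2, p.2)) := by
  intro zs
  induction zs with
  | nil => intro L; simp [pvEmit]
  | cons a t ih =>
    intro L
    obtain ⟨p, s⟩ := a
    by_cases h : minS ≤ L
    · have h0 : (minS - L).toNat = 0 := by omega
      have h1 : (minS - (L + 1)).toNat = 0 := by omega
      simp [pvEmit, h, ih, h0, h1]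
    · have h0 : (minS - L).toNat = (minS - (L + 1)).toNat + 1 := by omega
      simp [pvEmit, h, ih, h0]

-- ===== VERDICT (by name: the statement is the Claim_ definition above) =====
theorem straight_line_spec : Claim_equal_straight_line := by
  intro grid row col dr dc minS maxS _ _
  unfold Spec_straight_line straight_line straight_line_alt
  rw [pvLoopA_eq_emit, pvEmit_eq_drop]
  have hfuel : maxS.toNat = (max 0 maxS).toNat := by omega
  have hdrop : (minS - 1).toNat = (max minS 1 - 1).toNat := by omega
  rw [hfuel, hdrop]
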